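-- pv_equiv track=rewrite | github.com/frc6357/Vision2020 | src/find_b.py | find_b
-- ===== SOURCE A (Python) =====
-- def find_b(m, input):
--     output = [a for a in input if a[0] == m]
--     if len(output) > 1:
--         output_b = [a[1] for a in output]
--         smallest_b = max(output_b)
--         output = [a for a in input if a[0] == m and a[1] == smallest_b]
--         output = [a for t in output for a in t]
--         return output
--     else:
--         output = [a for t in output for a in t]
--         return output
-- ===== SOURCE B (Python) =====
-- def find_b(m, input):
--     best = None
--     result = []
--     for a in input:
--         if a[0] == m:
--             if best is None or a[1] > best:
--                 best = a[1]
--                 result = [a]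
--             elif a[1] == best:
--                 result.append(a)
--     return [x for t in result for x in t]
-- ===== Notes on version B (the rewrite author's own statement) =====
-- stated objective: alternative
-- what changed: Single pass keeping the running best second value and the list of tied matching tuples, instead of A's three separate scans (filter, max over seconds, re-filter) and len>1 branch.
import Mathlib
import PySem

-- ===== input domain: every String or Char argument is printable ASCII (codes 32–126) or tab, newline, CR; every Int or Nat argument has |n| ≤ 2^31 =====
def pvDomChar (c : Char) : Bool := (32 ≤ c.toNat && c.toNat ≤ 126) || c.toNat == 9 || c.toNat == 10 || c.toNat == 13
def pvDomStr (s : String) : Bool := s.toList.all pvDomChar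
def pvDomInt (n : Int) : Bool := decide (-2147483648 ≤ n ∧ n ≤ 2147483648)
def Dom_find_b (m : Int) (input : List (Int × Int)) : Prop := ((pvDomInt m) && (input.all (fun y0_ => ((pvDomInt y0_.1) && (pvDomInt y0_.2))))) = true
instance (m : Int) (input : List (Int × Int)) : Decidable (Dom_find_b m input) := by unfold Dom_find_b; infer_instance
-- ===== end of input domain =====

-- B replaces A's three scans (filter, max, re-filter) by one pass keeping the running best
-- second value and the tied matching tuples; objective: alternative (same cost, one pass).

-- ===== PORT A =====
def find_b (m : Int) (input : List (Int × Int)) : List Int :=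
  let output := input.filter (fun a => a.1 == m)
  if 1 < output.length then
    let output_b := output.map (fun a => a.2)
    match PySem.List.max? output_b (fun y => y) with
    | some smallest_b =>
        ((input.filter (fun a => a.1 == m && a.2 == smallest_b)).flatMap (fun a => [a.1, a.2]))
    | none => []   -- unreachable: output is nonempty here (Python's max never raises on this branch)
  else
    output.flatMap (fun a => [a.1, a.2])

-- ===== PORT B =====
def findLoop (m : Int) (best : Option Int) (result : List (Int × Int)) : List (Int × Int) → Option Int × List (Int × Int)
  | [] => (best, result)
  | a :: rest =>
    if a.1 == m then
      match best with
      | none => findLoop m (some a.2) [a] rest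
      | some b =>
        if b < a.2 then findLoop m (some a.2) [a] rest
        else if a.2 == b then findLoop m (some b) (result ++ [a]) rest
        else findLoop m (some b) result rest
    else findLoop m best result rest

def find_b_alt (m : Int) (input : List (Int × Int)) : List Int :=
  ((findLoop m none [] input).2).flatMap (fun a => [a.1, a.2])

-- ===== PRECONDITION & SPEC =====
def Spec_find_b (m : Int) (input : List (Int × Int)) (out : List Int) : Prop := out = find_b_alt m input
instance (m : Int) (input : List (Int × Int)) (out : List Int) : Decidable (Spec_find_b m input out) := by unfold Spec_find_b; infer_instance

-- ===== CLAIM (what is proved, stated in full; the proofs are below) =====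
def Claim_equal_find_b : Prop := ∀ (m : Int) (input : List (Int × Int)), Dom_find_b m input → Spec_find_b m input (find_b m input)

-- ===== LEMMAS AND PROOFS =====

-- running-max characterisation of the loop started with best = some b
theorem loop_some (m : Int) (l : List (Int × Int)) : ∀ (b : Int) (res : List (Int × Int)),
    findLoop m (some b) res l =
      (some (((l.filter (fun a => a.1 == m)).map (fun x => x.2)).foldl max b),
       if (((l.filter (fun a => a.1 == m)).map (fun x => x.2)).foldl max b) = b
       then res ++ (l.filter (fun a => a.1 == m)).filter (fun a => a.2 == b)
       else (l.filter (fun a => a.1 == m)).filter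
              (fun a => a.2 == (((l.filter (fun a => a.1 == m)).map (fun x => x.2)).foldl max b))) := by
  induction l with
  | nil => intro b res; simp [findLoop]
  | cons a rest ih =>
    intro b res
    by_cases hm : (a.1 == m) = true
    · have hstep : findLoop m (some b) res (a :: rest) =
          (if b < a.2 then findLoop m (some a.2) [a] rest
           else if a.2 == b then findLoop m (some b) (res ++ [a]) rest
           else findLoop m (some b) res rest) := by
        simp [findLoop, hm]
      rw [hstep, List.filter_cons_of_pos (p := fun x : Int × Int => x.1 == m) hm]
      simp only [List.map_cons, List.foldl_cons]
      by_cases hlt : b < a.2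
      · have hmax : max b a.2 = a.2 := by omega
        have hK := (PySem.List.le_foldl_max ((rest.filter (fun a => a.1 == m)).map (fun x => x.2)) a.2).1
        rw [if_pos hlt, ih, hmax]
        have hKb : ¬ ((rest.filter (fun a => a.1 == m)).map (fun x => x.2)).foldl max a.2 = b := by omega
        rw [if_neg hKb]
        by_cases hKa : ((rest.filter (fun a => a.1 == m)).map (fun x => x.2)).foldl max a.2 = a.2
        · rw [if_pos hKa, hKa, List.filter_cons_of_pos (by simp)]
          simp
        · rw [if_neg hKa, List.filter_cons_of_neg (by simpa using fun h => hKa h.symm)]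
      · rw [if_neg hlt]
        by_cases heq : (a.2 == b) = true
        · have hb : a.2 = b := by simpa using heq
          have hmax : max b a.2 = b := by omega
          rw [if_pos heq, ih, hmax]
          by_cases hKb : ((rest.filter (fun a => a.1 == m)).map (fun x => x.2)).foldl max b = b
          · rw [if_pos hKb, if_pos hKb, List.filter_cons_of_pos (by simpa using hb)]
            simp
          · rw [if_neg hKb, if_neg hKb,
              List.filter_cons_of_neg (by simp only [beq_iff_eq]; omega)]
        · have hb : a.2 < b := by
            have : ¬ a.2 = b := by simpa using heq
            omega
          have hmax : max b a.2 = b := by omega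
          have hK := (PySem.List.le_foldl_max ((rest.filter (fun a => a.1 == m)).map (fun x => x.2)) b).1
          rw [if_neg heq, ih, hmax]
          by_cases hKb : ((rest.filter (fun a => a.1 == m)).map (fun x => x.2)).foldl max b = b
          · rw [if_pos hKb, if_pos hKb, List.filter_cons_of_neg (by simp only [beq_iff_eq]; omega)]
          · rw [if_neg hKb, if_neg hKb, List.filter_cons_of_neg (by simp only [beq_iff_eq]; omega)]
    · have hstep : findLoop m (some b) res (a :: rest) = findLoop m (some b) res rest := by
        simp [findLoop, hm]
      rw [hstep, List.filter_cons_of_neg (p := fun x : Int × Int => x.1 == m) hm, ih]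

-- the loop started from best = none: nothing until the first match, then loop_some takes over
theorem loop_none (m : Int) (l : List (Int × Int)) :
    (findLoop m none [] l).2 =
      match l.filter (fun a => a.1 == m) with
      | [] => []
      | a :: M =>
        if ((M.map (fun x => x.2)).foldl max a.2) = a.2
        then a :: M.filter (fun x => x.2 == a.2)
        else M.filter (fun x => x.2 == ((M.map (fun x => x.2)).foldl max a.2)) := by
  induction l with
  | nil => simp [findLoop]
  | cons a rest ih =>
    by_cases hm : (a.1 == m) = true
    · have hstep : findLoop m none [] (a :: rest) = findLoop m (some a.2) [a] rest := by
        simp [findLoop, hm]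
      rw [hstep, loop_some, List.filter_cons_of_pos (p := fun x : Int × Int => x.1 == m) hm]
      by_cases hK : ((rest.filter (fun x => x.1 == m)).map (fun x => x.2)).foldl max a.2 = a.2
      · simp [hK]
      · simp [hK]
    · have hstep : findLoop m none [] (a :: rest) = findLoop m none [] rest := by
        simp [findLoop, hm]
      rw [hstep, List.filter_cons_of_neg (p := fun x : Int × Int => x.1 == m) hm, ih]

-- ===== VERDICT (by name: the statement is the Claim_ definition above) =====
theorem find_b_spec : Claim_equal_find_b := by
  intro m input _
  unfold Spec_find_b find_b find_b_alt
  rw [loop_none]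
  have hfilter : ∀ v : Int, input.filter (fun x => x.1 == m && x.2 == v)
      = (input.filter (fun x => x.1 == m)).filter (fun x => x.2 == v) := by
    intro v
    rw [List.filter_filter]
    exact List.filter_congr (by intro x _; rw [Bool.and_comm])
  cases hM : input.filter (fun a => a.1 == m) with
  | nil => simp
  | cons a M =>
    cases M with
    | nil => simp
    | cons a' M' =>
      simp only [List.length_cons, List.map_cons, PySem.List.max?_id_cons, List.foldl_cons]
      rw [if_pos (by omega)]
      rw [hfilter, hM]
      by_cases hK : (((a' :: M').map (fun x => x.2)).foldl max a.2) = a.2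
      · simp only [List.map_cons, List.foldl_cons] at hK ⊢
        rw [if_pos hK, hK, List.filter_cons_of_pos (by simp)]
      · simp only [List.map_cons, List.foldl_cons] at hK ⊢
        rw [if_neg hK, List.filter_cons_of_neg (by simpa using fun h => hK h.symm)]
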